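-- pv_equiv track=rewrite | github.com/AlisaEee/lab3_TFL | test.py | has_brackets
-- ===== SOURCE A (Python) =====
-- def has_brackets(symbol, input_str):
--     found = False
--     for line in input_str.split("\n"):
--         line = line.strip()
--         if line != "":
--             # Парсим правило
--             parts = line.split("->")
--             if len(parts) == 2:
--                 lhs = parts[0].strip()
--                 if lhs == symbol: # Нашли символ с []
--                     found = True
--                 elif lhs == symbol[1:-1]: # Нашли символ без []
--                     found = False
--     return found
-- ===== SOURCE B (Python) =====
-- def has_brackets(symbol, input_str):
--     inner = symbol[1:-1]
--     for line in reversed(input_str.split("\n")):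
--         line = line.strip()
--         if line == "":
--             continue
--         parts = line.split("->")
--         if len(parts) != 2:
--             continue
--         lhs = parts[0].strip()
--         if lhs == symbol:
--             return True
--         if lhs == inner:
--             return False
--     return False
-- ===== Notes on version B (the rewrite author's own statement) =====
-- stated objective: alternative
-- what changed: Replaces the forward scan that keeps overwriting a boolean flag with a backward scan over the lines that returns on the first decisive match (the former last match), skipping non-rule lines.
import Mathlib
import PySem

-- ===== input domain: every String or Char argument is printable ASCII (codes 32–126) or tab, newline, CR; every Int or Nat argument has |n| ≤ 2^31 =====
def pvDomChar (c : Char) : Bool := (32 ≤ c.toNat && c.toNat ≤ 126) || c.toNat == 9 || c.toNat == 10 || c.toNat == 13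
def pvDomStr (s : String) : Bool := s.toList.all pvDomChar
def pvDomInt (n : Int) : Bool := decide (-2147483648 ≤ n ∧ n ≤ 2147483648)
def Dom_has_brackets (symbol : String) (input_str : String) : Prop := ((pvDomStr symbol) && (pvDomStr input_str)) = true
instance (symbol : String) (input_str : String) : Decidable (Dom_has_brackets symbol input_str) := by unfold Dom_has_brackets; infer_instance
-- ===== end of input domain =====

-- B replaces A's forward scan with an overwritten flag by a backward scan returning at the first decisive rule line (same last-match semantics); alternative decomposition, return value only.

-- ===== PORT A =====
-- one loop iteration of A: update the flag 'found' from one line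
def pvStepA (symbol : String) (found : Bool) (line : String) : Bool :=
  let l := PySem.Str.strip line
  if l ≠ "" then
    let parts := (PySem.Str.split? l "->").getD []
    if parts.length = 2 then
      let lhs := PySem.Str.strip (parts.headD "")
      if lhs = symbol then true
      else if lhs = PySem.Str.slice symbol (some 1) (some (-1)) then false
      else found
    else found
  else found

def has_brackets (symbol : String) (input_str : String) : Bool :=
  ((PySem.Str.split? input_str "\n").getD []).foldl (pvStepA symbol) false

-- ===== PORT B =====
-- B's backward scan: return at the first decisive line of the reversed list
def pvScanB (symbol : String) (inner : String) : List String → Bool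
  | [] => false
  | line :: rest =>
    let l := PySem.Str.strip line
    if l = "" then pvScanB symbol inner rest
    else
      let parts := (PySem.Str.split? l "->").getD []
      if parts.length ≠ 2 then pvScanB symbol inner rest
      else
        let lhs := PySem.Str.strip (parts.headD "")
        if lhs = symbol then true
        else if lhs = inner then false
        else pvScanB symbol inner rest

def has_brackets_alt (symbol : String) (input_str : String) : Bool :=
  pvScanB symbol (PySem.Str.slice symbol (some 1) (some (-1)))
    ((PySem.Str.split? input_str "\n").getD []).reverse

-- ===== PRECONDITION & SPEC =====
def Spec_has_brackets (symbol : String) (input_str : String) (out : Bool) : Prop := out = has_brackets_alt symbol input_str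
instance (symbol : String) (input_str : String) (out : Bool) : Decidable (Spec_has_brackets symbol input_str out) := by unfold Spec_has_brackets; infer_instance

-- ===== CLAIM (what is proved, stated in full; the proofs are below) =====
def Claim_equal_has_brackets : Prop := ∀ (symbol : String) (input_str : String), Dom_has_brackets symbol input_str → Spec_has_brackets symbol input_str (has_brackets symbol input_str)

-- ===== LEMMAS AND PROOFS =====

-- forward fold from 'false' equals the backward first-match scan
theorem pvFold_eq_scan (symbol : String) (ls : List String) :
    ls.foldl (pvStepA symbol) false
      = pvScanB symbol (PySem.Str.slice symbol (some 1) (some (-1))) ls.reverse := by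
  induction ls using List.reverseRecOn with
  | nil => rfl
  | append_singleton ls x ih =>
    rw [List.foldl_append, List.reverse_append]
    simp only [List.foldl_cons, List.foldl_nil, List.reverse_singleton, List.singleton_append]
    rw [pvStepA, pvScanB]
    by_cases h1 : PySem.Str.strip x = ""
    · simp [h1, ih]
    · simp only [h1, if_neg h1, ne_eq, not_false_eq_true, if_true, if_false]
      by_cases h2 : ((PySem.Str.split? (PySem.Str.strip x) "->").getD []).length = 2
      · simp [h2, ih]
      · simp [h2, ih]

-- ===== VERDICT (by name: the statement is the Claim_ definition above) =====
theorem has_brackets_spec : Claim_equal_has_brackets := by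
  intro symbol input_str _
  unfold Spec_has_brackets has_brackets has_brackets_alt
  exact pvFold_eq_scan symbol _
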